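-- pv_equiv track=rewrite | github.com/filvan/privGuard | src/examples/program/traccar/database/ldapProvider.py | encodeForLdap
-- ===== SOURCE A (Python) =====
-- def encodeForLdap(input):
--     if input is None:
--         return None
--     sb = ""
--     i = 0
--     while i < len(input):
--         c = input[i]
--         if c == '\\':
--             sb += ("\\5c")
--         elif c == '*':
--             sb += ("\\2a")
--         elif c == '(':
--             sb += ("\\28")
--         elif c == ')':
--             sb += ("\\29")
--         elif c == '\0':
--             sb += ("\\00")
--         else:
--             sb += (c)
--         i += 1
--     return str(sb)
-- ===== SOURCE B (Python) =====
-- def encodeForLdap(input):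
--     if input is None:
--         return None
--     # staged whole-string passes: escape the escape character first, then each
--     # special character; later passes never touch text inserted by earlier ones
--     # because no escape sequence contains *, (, ) or NUL.
--     out = input.replace('\\', '\\5c')
--     out = out.replace('\0', '\\00')
--     out = out.replace('*', '\\2a')
--     out = out.replace('(', '\\28')
--     out = out.replace(')', '\\29')
--     return out
-- ===== Notes on version B (the rewrite author's own statement) =====
-- stated objective: idiomatic
-- what changed: replaces A's single index-driven pass with a per-character if/elif chain and quadratic string concatenation by five staged whole-string str.replace passes (backslash escaped first so later passes cannot touch inserted escapes)
import Mathlib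
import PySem

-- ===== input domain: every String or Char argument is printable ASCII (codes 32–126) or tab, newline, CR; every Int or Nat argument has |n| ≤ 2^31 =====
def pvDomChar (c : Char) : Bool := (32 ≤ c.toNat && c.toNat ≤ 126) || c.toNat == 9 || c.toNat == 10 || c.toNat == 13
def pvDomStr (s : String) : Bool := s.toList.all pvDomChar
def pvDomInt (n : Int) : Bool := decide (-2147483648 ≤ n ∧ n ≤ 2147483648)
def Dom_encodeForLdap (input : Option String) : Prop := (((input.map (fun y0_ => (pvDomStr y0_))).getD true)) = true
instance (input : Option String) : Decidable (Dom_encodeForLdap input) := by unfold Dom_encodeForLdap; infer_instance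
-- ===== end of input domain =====

-- ===== PORT A =====
-- B replaces A's single index-driven pass (if/elif chain, string accumulator)
-- by five staged whole-string replace passes, backslash escaped first.

-- A's while loop over index i carrying the accumulator sb; transcribed as
-- structural recursion over the remaining characters (same state, same branches).
def encLoopA (sb : String) (cs : List Char) : String :=
  match cs with
  | [] => sb
  | c :: rest =>
      if c = '\\' then encLoopA (sb ++ "\\5c") rest
      else if c = '*' then encLoopA (sb ++ "\\2a") rest
      else if c = '(' then encLoopA (sb ++ "\\28") rest
      else if c = ')' then encLoopA (sb ++ "\\29") rest
      else if c = Char.ofNat 0 then encLoopA (sb ++ "\\00") rest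
      else encLoopA (sb ++ String.ofList [c]) rest

def encodeForLdap (input : Option String) : Option String :=
  match input with
  | none => none
  | some s => some (encLoopA "" s.toList)

-- ===== PORT B =====
-- Source B's five staged str.replace passes, in the same order.
def encodeForLdap_alt (input : Option String) : Option String :=
  match input with
  | none => none
  | some s =>
      some (PySem.Str.replace
              (PySem.Str.replace
                (PySem.Str.replace
                  (PySem.Str.replace
                    (PySem.Str.replace s "\\" "\\5c")
                    (String.ofList [Char.ofNat 0]) "\\00")
                  "*" "\\2a")
                "(" "\\28")
              ")" "\\29")

-- ===== PRECONDITION & SPEC =====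
def Spec_encodeForLdap (input : Option String) (out : Option String) : Prop := out = encodeForLdap_alt input
instance (input : Option String) (out : Option String) : Decidable (Spec_encodeForLdap input out) := by unfold Spec_encodeForLdap; infer_instance

-- ===== CLAIM =====
def Claim_equal_encodeForLdap : Prop := ∀ (input : Option String), Dom_encodeForLdap input → Spec_encodeForLdap input (encodeForLdap input)

-- ===== LEMMAS AND PROOFS =====

theorem string_toList_inj {a b : String} (h : a.toList = b.toList) : a = b := by
  have := congrArg String.ofList h
  simpa using this

-- replace with a single-character pattern is the per-character flatMap
theorem go_single (c : Char) (new : List Char) :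
    ∀ (l acc : List Char) (fuel : Nat), l.length ≤ fuel →
      PySem.Chars.replace.go [c] new fuel l acc =
        acc.reverse ++ l.flatMap (fun x => if x = c then new else [x]) := by
  intro l
  induction l with
  | nil =>
      intro acc fuel _
      cases fuel <;> simp [PySem.Chars.replace.go]
  | cons d t ih =>
      intro acc fuel hf
      cases fuel with
      | zero => simp at hf
      | succ n =>
          have ht : t.length ≤ n := by simpa using hf
          by_cases hdc : d = c
          · subst hdc
            rw [PySem.Chars.replace.go]
            simp [List.isPrefixOf, ih _ _ ht, List.append_assoc]
          · rw [PySem.Chars.replace.go]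
            have : [c].isPrefixOf (d :: t) = false := by
              simp [List.isPrefixOf]
              exact fun h => hdc h.symm
            simp [this, ih _ _ ht, hdc]

theorem replace_single (s : List Char) (c : Char) (new : List Char) :
    PySem.Chars.replace s [c] new = s.flatMap (fun x => if x = c then new else [x]) := by
  rw [PySem.Chars.replace]
  simp [go_single c new s [] s.length le_rfl]

-- the loop's accumulator is the concatenation of per-character escapes
theorem encLoopA_toList (cs : List Char) (sb : String) :
    (encLoopA sb cs).toList =
      sb.toList ++ (cs.flatMap
        fun c =>
          if c = '\\' then ['\\', '5', 'c']
          else if c = '*' then ['\\', '2', 'a']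
          else if c = '(' then ['\\', '2', '8']
          else if c = ')' then ['\\', '2', '9']
          else if c = Char.ofNat 0 then ['\\', '0', '0']
          else [c]) := by
  induction cs generalizing sb with
  | nil => simp [encLoopA]
  | cons c rest ih =>
      have t1 : ("\\5c" : String).toList = ['\\', '5', 'c'] := by decide
      have t2 : ("\\2a" : String).toList = ['\\', '2', 'a'] := by decide
      have t3 : ("\\28" : String).toList = ['\\', '2', '8'] := by decide
      have t4 : ("\\29" : String).toList = ['\\', '2', '9'] := by decide
      have t5 : ("\\00" : String).toList = ['\\', '0', '0'] := by decide
      simp only [encLoopA, List.flatMap_cons]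
      split_ifs with h1 h2 h3 h4 h5 <;>
        rw [ih] <;>
        simp [String.toList_append, t1, t2, t3, t4, t5, List.append_assoc]

-- ===== VERDICT =====
theorem encodeForLdap_spec : Claim_equal_encodeForLdap := by
  intro input _
  unfold Spec_encodeForLdap encodeForLdap encodeForLdap_alt
  cases input with
  | none => rfl
  | some s =>
      refine congrArg some (string_toList_inj ?_)
      have b1 : ("\\" : String).toList = ['\\'] := by decide
      have b2 : (String.ofList [Char.ofNat 0]).toList = [Char.ofNat 0] := by decide
      have b3 : ("*" : String).toList = ['*'] := by decide
      have b4 : ("(" : String).toList = ['('] := by decide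
      have b5 : (")" : String).toList = [')'] := by decide
      simp only [PySem.Str.toList_replace, b1, b2, b3, b4, b5,
        replace_single, encLoopA_toList]
      rw [String.toList_empty, List.nil_append,
        List.flatMap_assoc, List.flatMap_assoc, List.flatMap_assoc, List.flatMap_assoc]
      apply List.flatMap_congr
      intro c _
      by_cases h1 : c = '\\'; · subst h1; decide
      by_cases h2 : c = '*'; · subst h2; decide
      by_cases h3 : c = '('; · subst h3; decide
      by_cases h4 : c = ')'; · subst h4; decide
      by_cases h5 : c = Char.ofNat 0; · subst h5; decide
      simp [h1, h2, h3, h4, h5]
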